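-- pv_equiv track=rewrite | github.com/urdoggydeewata-star/DexEmAll | lib/pokemon_utils.py | normalize_base_stats
-- ===== SOURCE A (Python) =====
-- def normalize_base_stats(src: dict | None) -> dict:
--     """Convert stats dict to long-form keys for stat calculation. Alias: normalize_stats_for_generator."""
--     if not isinstance(src, dict):
--         return {}
--     lk = {str(k).lower().replace("-", "_"): v for k, v in src.items()}
--     return {
--         "hp": int(lk.get("hp", 0)),
--         "attack": int(lk.get("attack", lk.get("atk", 0))),
--         "defense": int(lk.get("defense", lk.get("def", 0))),
--         "special_attack": int(lk.get("special_attack", lk.get("spa", lk.get("specialattack", 0)))),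
--         "special_defense": int(lk.get("special_defense", lk.get("spd", lk.get("specialdefense", 0)))),
--         "speed": int(lk.get("speed", lk.get("spe", 0))),
--     }
-- ===== SOURCE B (Python) =====
-- # Single streaming pass: instead of building a normalized dict and resolving six
-- # alias-fallback chains against it, scan src once keeping per-stat (value, rank)
-- # where rank is the alias precedence; an item overwrites when its rank is <= the
-- # stored one (so the best-precedence alias wins, and the last occurrence of the
-- # same alias wins, matching dict-comprehension overwrite semantics).
--
-- _SLOT = {
--     "hp": (0, 0),
--     "attack": (1, 0), "atk": (1, 1),
--     "defense": (2, 0), "def": (2, 1),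
--     "special_attack": (3, 0), "spa": (3, 1), "specialattack": (3, 2),
--     "special_defense": (4, 0), "spd": (4, 1), "specialdefense": (4, 2),
--     "speed": (5, 0), "spe": (5, 1),
-- }
-- _NAMES = ["hp", "attack", "defense", "special_attack", "special_defense", "speed"]
--
--
-- def normalize_base_stats(src):
--     if not isinstance(src, dict):
--         return {}
--     st = [(0, 3)] * 6  # (value, rank); rank 3 = nothing seen yet
--     for k, v in src.items():
--         hit = _SLOT.get(str(k).lower().replace("-", "_"))
--         if hit is not None:
--             i, r = hit
--             if r <= st[i][1]:
--                 st[i] = (v, r)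
--     return {name: int(st[i][0]) for i, name in enumerate(_NAMES)}
-- ===== Notes on version B (the rewrite author's own statement) =====
-- stated objective: alternative
-- what changed: Instead of building a normalized-key dict and resolving six nested alias-fallback .get chains against it, B makes a single streaming pass over the items keeping a per-stat (value, rank) accumulator where rank is alias precedence; an item overwrites its stat slot when its alias rank is <= the stored rank, so no intermediate lk dict exists.
import Mathlib
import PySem

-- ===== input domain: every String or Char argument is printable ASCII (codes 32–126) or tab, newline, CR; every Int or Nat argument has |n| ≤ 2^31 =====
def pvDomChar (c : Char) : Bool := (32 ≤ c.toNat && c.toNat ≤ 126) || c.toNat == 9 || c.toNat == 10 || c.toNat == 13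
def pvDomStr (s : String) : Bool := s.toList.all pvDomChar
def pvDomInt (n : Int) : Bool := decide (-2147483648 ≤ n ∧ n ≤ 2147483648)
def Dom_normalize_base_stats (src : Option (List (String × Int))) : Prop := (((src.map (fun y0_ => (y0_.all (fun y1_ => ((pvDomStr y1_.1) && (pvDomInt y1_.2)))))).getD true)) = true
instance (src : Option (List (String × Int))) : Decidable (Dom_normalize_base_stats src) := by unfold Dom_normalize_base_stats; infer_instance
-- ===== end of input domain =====

-- B replaces A's normalized-dict + six nested getD fallback chains with a single
-- streaming pass over the items keeping a per-stat (value, rank) best-precedence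
-- accumulator (objective: alternative decomposition).

-- ===== PORT A =====
-- str(k).lower().replace("-", "_")  (key normalisation, used by both pythons)
def pvNormKey (k : String) : String :=
  PySem.Str.replace (PySem.Str.lower k) "-" "_"

-- lk = {str(k).lower().replace("-", "_"): v for k, v in src.items()}
def pvLK (items : List (String × Int)) : PySem.Dict String Int :=
  items.foldl (fun d p => d.insert (pvNormKey p.1) p.2) PySem.Dict.empty

def normalize_base_stats (src : Option (List (String × Int))) : List (String × Int) :=
  match src with
  | none => []
  | some items =>
    let lk := pvLK items
    [("hp", lk.getD "hp" 0),
     ("attack", lk.getD "attack" (lk.getD "atk" 0)),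
     ("defense", lk.getD "defense" (lk.getD "def" 0)),
     ("special_attack", lk.getD "special_attack" (lk.getD "spa" (lk.getD "specialattack" 0))),
     ("special_defense", lk.getD "special_defense" (lk.getD "spd" (lk.getD "specialdefense" 0))),
     ("speed", lk.getD "speed" (lk.getD "spe" 0))]

-- ===== PORT B =====
-- _SLOT: normalized alias -> (slot index, precedence rank)
def pvSlot : PySem.Dict String (Nat × Nat) :=
  PySem.Dict.ofList
    [("hp", (0, 0)),
     ("attack", (1, 0)), ("atk", (1, 1)),
     ("defense", (2, 0)), ("def", (2, 1)),
     ("special_attack", (3, 0)), ("spa", (3, 1)), ("specialattack", (3, 2)),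
     ("special_defense", (4, 0)), ("spd", (4, 1)), ("specialdefense", (4, 2)),
     ("speed", (5, 0)), ("spe", (5, 1))]

def pvNames : List String :=
  ["hp", "attack", "defense", "special_attack", "special_defense", "speed"]

-- loop body: hit = _SLOT.get(nk); if hit is not None: i, r = hit; if r <= st[i][1]: st[i] = (v, r)
-- (st always has length 6 and 0 ≤ i < 6, so List.getD/List.set are exact for st[i])
def pvStep (st : List (Int × Nat)) (p : String × Int) : List (Int × Nat) :=
  match pvSlot.get? (pvNormKey p.1) with
  | none => st
  | some ir => if ir.2 ≤ (st.getD ir.1 (0, 3)).2 then st.set ir.1 (p.2, ir.2) else st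

def normalize_base_stats_alt (src : Option (List (String × Int))) : List (String × Int) :=
  match src with
  | none => []
  | some items =>
    let st := items.foldl pvStep (PySem.List.pyRepeat [((0 : Int), (3 : Nat))] 6)
    (PySem.List.enumerate pvNames).map (fun p => (p.2, (PySem.List.pyGetD st p.1 (0, 3)).1))

-- ===== PRECONDITION & SPEC =====
def Spec_normalize_base_stats (src : Option (List (String × Int))) (out : List (String × Int)) : Prop := out = normalize_base_stats_alt src
instance (src : Option (List (String × Int))) (out : List (String × Int)) : Decidable (Spec_normalize_base_stats src out) := by unfold Spec_normalize_base_stats; infer_instance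

-- ===== CLAIM (what is proved, stated in full; the proofs are below) =====
def Claim_equal_normalize_base_stats : Prop := ∀ (src : Option (List (String × Int))), Dom_normalize_base_stats src → Spec_normalize_base_stats src (normalize_base_stats src)

-- ===== LEMMAS AND PROOFS =====

-- per-slot specification of B's accumulator in terms of A's dict lk
def pvS0 (lk : PySem.Dict String Int) : Int × Nat :=
  match lk.get? "hp" with
  | some v => (v, 0)
  | none => (0, 3)
def pvS1 (lk : PySem.Dict String Int) : Int × Nat :=
  match lk.get? "attack", lk.get? "atk" with
  | some v, _ => (v, 0)
  | none, some v => (v, 1)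
  | none, none => (0, 3)
def pvS2 (lk : PySem.Dict String Int) : Int × Nat :=
  match lk.get? "defense", lk.get? "def" with
  | some v, _ => (v, 0)
  | none, some v => (v, 1)
  | none, none => (0, 3)
def pvS3 (lk : PySem.Dict String Int) : Int × Nat :=
  match lk.get? "special_attack", lk.get? "spa", lk.get? "specialattack" with
  | some v, _, _ => (v, 0)
  | none, some v, _ => (v, 1)
  | none, none, some v => (v, 2)
  | none, none, none => (0, 3)
def pvS4 (lk : PySem.Dict String Int) : Int × Nat :=
  match lk.get? "special_defense", lk.get? "spd", lk.get? "specialdefense" with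
  | some v, _, _ => (v, 0)
  | none, some v, _ => (v, 1)
  | none, none, some v => (v, 2)
  | none, none, none => (0, 3)
def pvS5 (lk : PySem.Dict String Int) : Int × Nat :=
  match lk.get? "speed", lk.get? "spe" with
  | some v, _ => (v, 0)
  | none, some v => (v, 1)
  | none, none => (0, 3)

def pvSts (lk : PySem.Dict String Int) : List (Int × Nat) :=
  [pvS0 lk, pvS1 lk, pvS2 lk, pvS3 lk, pvS4 lk, pvS5 lk]

def pvSlotItems : List (String × (Nat × Nat)) :=
  [("hp", (0,0)), ("attack", (1,0)), ("atk", (1,1)), ("defense", (2,0)), ("def", (2,1)), ("special_attack", (3,0)), ("spa", (3,1)), ("specialattack", (3,2)), ("special_defense", (4,0)), ("spd", (4,1)), ("specialdefense", (4,2)), ("speed", (5,0)), ("spe", (5,1))]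

theorem pvLK_append (items : List (String × Int)) (p : String × Int) :
    pvLK (items ++ [p]) = (pvLK items).insert (pvNormKey p.1) p.2 := by
  simp [pvLK, List.foldl_append]

theorem pvStep_spec (lk : PySem.Dict String Int) (nk : String) (v : Int) :
    (match pvSlot.get? nk with
     | none => pvSts lk
     | some ir => if ir.2 ≤ ((pvSts lk).getD ir.1 (0, 3)).2
                  then (pvSts lk).set ir.1 (v, ir.2) else pvSts lk)
    = pvSts (lk.insert nk v) := by
  by_cases e0 : nk = "hp"
  · subst e0
    cases h0 : lk.get? "hp" <;> simp [pvSts, pvS0, pvS1, pvS2, pvS3, pvS4, pvS5, PySem.Dict.get?_insert, h0, show pvSlot.get? "hp" = some (0,0) from rfl]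
  by_cases e1 : nk = "attack"
  · subst e1
    cases h0 : lk.get? "attack" <;> cases h1 : lk.get? "atk" <;> simp [pvSts, pvS0, pvS1, pvS2, pvS3, pvS4, pvS5, PySem.Dict.get?_insert, h0, h1, show pvSlot.get? "attack" = some (1,0) from rfl]
  by_cases e2 : nk = "atk"
  · subst e2
    cases h0 : lk.get? "attack" <;> cases h1 : lk.get? "atk" <;> simp [pvSts, pvS0, pvS1, pvS2, pvS3, pvS4, pvS5, PySem.Dict.get?_insert, h0, h1, show pvSlot.get? "atk" = some (1,1) from rfl]
  by_cases e3 : nk = "defense"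
  · subst e3
    cases h0 : lk.get? "defense" <;> cases h1 : lk.get? "def" <;> simp [pvSts, pvS0, pvS1, pvS2, pvS3, pvS4, pvS5, PySem.Dict.get?_insert, h0, h1, show pvSlot.get? "defense" = some (2,0) from rfl]
  by_cases e4 : nk = "def"
  · subst e4
    cases h0 : lk.get? "defense" <;> cases h1 : lk.get? "def" <;> simp [pvSts, pvS0, pvS1, pvS2, pvS3, pvS4, pvS5, PySem.Dict.get?_insert, h0, h1, show pvSlot.get? "def" = some (2,1) from rfl]
  by_cases e5 : nk = "special_attack"
  · subst e5
    cases h0 : lk.get? "special_attack" <;> cases h1 : lk.get? "spa" <;> cases h2 : lk.get? "specialattack" <;> simp [pvSts, pvS0, pvS1, pvS2, pvS3, pvS4, pvS5, PySem.Dict.get?_insert, h0, h1, h2, show pvSlot.get? "special_attack" = some (3,0) from rfl]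
  by_cases e6 : nk = "spa"
  · subst e6
    cases h0 : lk.get? "special_attack" <;> cases h1 : lk.get? "spa" <;> cases h2 : lk.get? "specialattack" <;> simp [pvSts, pvS0, pvS1, pvS2, pvS3, pvS4, pvS5, PySem.Dict.get?_insert, h0, h1, h2, show pvSlot.get? "spa" = some (3,1) from rfl]
  by_cases e7 : nk = "specialattack"
  · subst e7
    cases h0 : lk.get? "special_attack" <;> cases h1 : lk.get? "spa" <;> cases h2 : lk.get? "specialattack" <;> simp [pvSts, pvS0, pvS1, pvS2, pvS3, pvS4, pvS5, PySem.Dict.get?_insert, h0, h1, h2, show pvSlot.get? "specialattack" = some (3,2) from rfl]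
  by_cases e8 : nk = "special_defense"
  · subst e8
    cases h0 : lk.get? "special_defense" <;> cases h1 : lk.get? "spd" <;> cases h2 : lk.get? "specialdefense" <;> simp [pvSts, pvS0, pvS1, pvS2, pvS3, pvS4, pvS5, PySem.Dict.get?_insert, h0, h1, h2, show pvSlot.get? "special_defense" = some (4,0) from rfl]
  by_cases e9 : nk = "spd"
  · subst e9
    cases h0 : lk.get? "special_defense" <;> cases h1 : lk.get? "spd" <;> cases h2 : lk.get? "specialdefense" <;> simp [pvSts, pvS0, pvS1, pvS2, pvS3, pvS4, pvS5, PySem.Dict.get?_insert, h0, h1, h2, show pvSlot.get? "spd" = some (4,1) from rfl]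
  by_cases e10 : nk = "specialdefense"
  · subst e10
    cases h0 : lk.get? "special_defense" <;> cases h1 : lk.get? "spd" <;> cases h2 : lk.get? "specialdefense" <;> simp [pvSts, pvS0, pvS1, pvS2, pvS3, pvS4, pvS5, PySem.Dict.get?_insert, h0, h1, h2, show pvSlot.get? "specialdefense" = some (4,2) from rfl]
  by_cases e11 : nk = "speed"
  · subst e11
    cases h0 : lk.get? "speed" <;> cases h1 : lk.get? "spe" <;> simp [pvSts, pvS0, pvS1, pvS2, pvS3, pvS4, pvS5, PySem.Dict.get?_insert, h0, h1, show pvSlot.get? "speed" = some (5,0) from rfl]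
  by_cases e12 : nk = "spe"
  · subst e12
    cases h0 : lk.get? "speed" <;> cases h1 : lk.get? "spe" <;> simp [pvSts, pvS0, pvS1, pvS2, pvS3, pvS4, pvS5, PySem.Dict.get?_insert, h0, h1, show pvSlot.get? "spe" = some (5,1) from rfl]
  have hn : pvSlot.get? nk = none := by
    rw [show pvSlot = PySem.Dict.mk pvSlotItems from rfl]
    simp only [pvSlotItems, PySem.Dict.get?_mk_cons, beq_iff_eq, Ne.symm e0, Ne.symm e1, Ne.symm e2, Ne.symm e3, Ne.symm e4, Ne.symm e5, Ne.symm e6, Ne.symm e7, Ne.symm e8, Ne.symm e9, Ne.symm e10, Ne.symm e11, Ne.symm e12, if_false]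
    rfl
  simp [hn, pvSts, pvS0, pvS1, pvS2, pvS3, pvS4, pvS5, PySem.Dict.get?_insert, Ne.symm e0, Ne.symm e1, Ne.symm e2, Ne.symm e3, Ne.symm e4, Ne.symm e5, Ne.symm e6, Ne.symm e7, Ne.symm e8, Ne.symm e9, Ne.symm e10, Ne.symm e11, Ne.symm e12]

theorem pvStep_eq (lk : PySem.Dict String Int) (p : String × Int) :
    pvStep (pvSts lk) p = pvSts (lk.insert (pvNormKey p.1) p.2) := by
  have := pvStep_spec lk (pvNormKey p.1) p.2
  simpa [pvStep] using this

theorem pvFold_spec (items : List (String × Int)) :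
    items.foldl pvStep (PySem.List.pyRepeat [((0 : Int), (3 : Nat))] 6) = pvSts (pvLK items) := by
  induction items using List.reverseRecOn with
  | nil => decide
  | append_singleton l p ih =>
      rw [List.foldl_append, List.foldl_cons, List.foldl_nil, ih, pvStep_eq, pvLK_append]

-- A's nested getD fallback chain is the first component of the per-slot spec
theorem pvS0_fst (lk : PySem.Dict String Int) : (pvS0 lk).1 = lk.getD "hp" 0 := by
  cases h : lk.get? "hp" <;> simp [pvS0, h, PySem.Dict.getD_eq_get?_getD]
theorem pvS1_fst (lk : PySem.Dict String Int) :
    (pvS1 lk).1 = lk.getD "attack" (lk.getD "atk" 0) := by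
  cases h : lk.get? "attack" <;> cases h' : lk.get? "atk" <;>
    simp [pvS1, h, h', PySem.Dict.getD_eq_get?_getD]
theorem pvS2_fst (lk : PySem.Dict String Int) :
    (pvS2 lk).1 = lk.getD "defense" (lk.getD "def" 0) := by
  cases h : lk.get? "defense" <;> cases h' : lk.get? "def" <;>
    simp [pvS2, h, h', PySem.Dict.getD_eq_get?_getD]
theorem pvS3_fst (lk : PySem.Dict String Int) :
    (pvS3 lk).1 = lk.getD "special_attack" (lk.getD "spa" (lk.getD "specialattack" 0)) := by
  cases h : lk.get? "special_attack" <;> cases h' : lk.get? "spa" <;> cases h'' : lk.get? "specialattack" <;>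
    simp [pvS3, h, h', h'', PySem.Dict.getD_eq_get?_getD]
theorem pvS4_fst (lk : PySem.Dict String Int) :
    (pvS4 lk).1 = lk.getD "special_defense" (lk.getD "spd" (lk.getD "specialdefense" 0)) := by
  cases h : lk.get? "special_defense" <;> cases h' : lk.get? "spd" <;> cases h'' : lk.get? "specialdefense" <;>
    simp [pvS4, h, h', h'', PySem.Dict.getD_eq_get?_getD]
theorem pvS5_fst (lk : PySem.Dict String Int) :
    (pvS5 lk).1 = lk.getD "speed" (lk.getD "spe" 0) := by
  cases h : lk.get? "speed" <;> cases h' : lk.get? "spe" <;>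
    simp [pvS5, h, h', PySem.Dict.getD_eq_get?_getD]

-- ===== VERDICT (by name: the statement is the Claim_ definition above) =====
theorem normalize_base_stats_spec : Claim_equal_normalize_base_stats := by
  intro src _
  unfold Spec_normalize_base_stats
  cases src with
  | none => rfl
  | some items =>
    simp only [normalize_base_stats, normalize_base_stats_alt]
    rw [pvFold_spec]
    simp [pvSts, pvNames, PySem.List.enumerate, PySem.List.pyGetD, PySem.List.pyGet?, PySem.List.pyIdx?, pvS0_fst, pvS1_fst, pvS2_fst, pvS3_fst, pvS4_fst, pvS5_fst]
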